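-- pv_equiv track=rewrite | github.com/mohoc/squares | naive/naive.py | positions_with_nb_squares
-- ===== SOURCE A (Python) =====
-- def is_square(word, beg_pos, end_pos) :
--   candidate_len = end_pos - beg_pos + 1
--   if candidate_len % 2 == 1 :
--     return False
--   else :
--     mid_len = candidate_len // 2
--     return word[beg_pos : beg_pos + mid_len] == word[beg_pos + mid_len : end_pos + 1]
--
-- def squares_inventory(word) :
--   squares_positions = {}
--   n = len(word)
--   for end_pos in range(n - 1, -1, -1) :
--     for beg_pos in range(end_pos, -1, -1) :
--       if is_square(word, beg_pos, end_pos) :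
--         mid_length = (end_pos - beg_pos + 1) // 2
--         squares_positions[word[beg_pos : beg_pos + mid_length]] = end_pos + 1
--   #empty word
--   squares_positions[""] = 0
--   return squares_positions
--
-- def squares_distribution(sq_inventory, len_word) :
--   nb_squares_at_pos = [0 for _ in range(len_word + 1)]
--   for square in sq_inventory :
--     nb_squares_at_pos[sq_inventory[square]] += 1
--   return nb_squares_at_pos
--
-- def positions_with_nb_squares(word, i) :
--   n = len(word)
--   sq_distrib = squares_distribution(squares_inventory(word), n)
--   pos_wanted = []
--   for pos in range(n) :
--     if sq_distrib[pos] == i :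
--       pos_wanted.append(pos)
--   return pos_wanted
-- ===== SOURCE B (Python) =====
-- def positions_with_nb_squares(word, i):
--     n = len(word)
--     count = [0] * (n + 1)
--     count[0] = 1  # the empty square ends at position 0
--     seen = set()
--     for p in range(2, n + 1):
--         for L in range(1, p // 2 + 1):
--             half = word[p - L:p]
--             if half not in seen and word[p - 2 * L:p - L] == half:
--                 seen.add(half)
--                 count[p] += 1
--     return [pos for pos in range(n) if count[pos] == i]
-- ===== Notes on version B (the rewrite author's own statement) =====
-- stated objective: faster
-- what changed: Instead of A's three passes (a descending-scan over all O(n^2) begin/end pairs building a half->min-end dict, a distribution pass over the dict, then a filter), B makes one ascending pass over end positions trying only even-length candidates, counts a square half at the first position where it appears using a first-seen set, and filters the per-position counts directly.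
import Mathlib
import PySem

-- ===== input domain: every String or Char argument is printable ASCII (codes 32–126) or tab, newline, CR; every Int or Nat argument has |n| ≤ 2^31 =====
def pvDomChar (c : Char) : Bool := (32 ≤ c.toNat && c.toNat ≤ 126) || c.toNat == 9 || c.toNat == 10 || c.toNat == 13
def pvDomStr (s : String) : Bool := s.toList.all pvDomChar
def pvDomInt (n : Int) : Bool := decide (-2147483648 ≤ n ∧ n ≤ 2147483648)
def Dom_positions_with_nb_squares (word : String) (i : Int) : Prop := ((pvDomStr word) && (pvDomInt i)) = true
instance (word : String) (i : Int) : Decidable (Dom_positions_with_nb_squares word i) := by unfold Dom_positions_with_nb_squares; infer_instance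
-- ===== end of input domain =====

-- B replaces A's three passes (O(n^2) begin/end dict pass, distribution pass, filter) by one
-- ascending pass over even-length candidates with a first-seen set; measurably faster by a constant factor.

-- ===== PORT A =====
def is_square (word : String) (beg_pos end_pos : Int) : Bool :=
  let candidate_len := end_pos - beg_pos + 1
  if PySem.Int.mod candidate_len 2 == 1 then false
  else
    let mid_len := PySem.Int.floordiv candidate_len 2
    PySem.Str.slice word (some beg_pos) (some (beg_pos + mid_len)) ==
      PySem.Str.slice word (some (beg_pos + mid_len)) (some (end_pos + 1))

def squares_inventory (word : String) : PySem.Dict String Int :=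
  let n := PySem.Str.len word
  let squares_positions :=
    (PySem.List.pyRange (n - 1) (-1) (-1)).foldl (fun sp end_pos =>
      (PySem.List.pyRange end_pos (-1) (-1)).foldl (fun sp beg_pos =>
        if is_square word beg_pos end_pos then
          sp.insert (PySem.Str.slice word (some beg_pos)
            (some (beg_pos + PySem.Int.floordiv (end_pos - beg_pos + 1) 2))) (end_pos + 1)
        else sp) sp) PySem.Dict.empty
  squares_positions.insert "" 0

def squares_distribution (sq_inventory : PySem.Dict String Int) (len_word : Int) : List Int :=
  let nb := (PySem.List.pyRange 0 (len_word + 1) 1).map (fun _ => (0 : Int))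
  -- sq_inventory[square]: square comes from the keys, so the lookup always succeeds; getD is exact here
  sq_inventory.keys.foldl (fun nb square =>
    PySem.List.pySetD nb (sq_inventory.getD square 0)
      (PySem.List.pyGetD nb (sq_inventory.getD square 0) 0 + 1)) nb

def positions_with_nb_squares (word : String) (i : Int) : List Int :=
  let n := PySem.Str.len word
  let sq_distrib := squares_distribution (squares_inventory word) n
  (PySem.List.pyRange 0 n 1).foldl (fun pos_wanted pos =>
    if PySem.List.pyGetD sq_distrib pos 0 == i then pos_wanted ++ [pos] else pos_wanted) []

-- ===== PORT B =====
def positions_with_nb_squares_alt (word : String) (i : Int) : List Int :=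
  let n := PySem.Str.len word
  let count := PySem.List.pySetD (List.replicate (n + 1).toNat (0 : Int)) 0 1
  let st := (PySem.List.pyRange 2 (n + 1) 1).foldl (fun st p =>
      (PySem.List.pyRange 1 (PySem.Int.floordiv p 2 + 1) 1).foldl (fun st L =>
        let half := PySem.Str.slice word (some (p - L)) (some p)
        if !(PySem.Set.contains st.2 half) &&
            (PySem.Str.slice word (some (p - 2 * L)) (some (p - L)) == half)
        then (PySem.List.pySetD st.1 p (PySem.List.pyGetD st.1 p 0 + 1), PySem.Set.add st.2 half)
        else st) st)
    (count, (PySem.Set.empty : PySem.Set String))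
  (PySem.List.pyRange 0 n 1).filter (fun pos => PySem.List.pyGetD st.1 pos 0 == i)

-- ===== PRECONDITION & SPEC =====
def Spec_positions_with_nb_squares (word : String) (i : Int) (out : List Int) : Prop := out = positions_with_nb_squares_alt word i
instance (word : String) (i : Int) (out : List Int) : Decidable (Spec_positions_with_nb_squares word i out) := by unfold Spec_positions_with_nb_squares; infer_instance

-- ===== CLAIM (what is proved, stated in full; the proofs are below) =====
def Claim_equal_positions_with_nb_squares : Prop := ∀ (word : String) (i : Int), Dom_positions_with_nb_squares word i → Spec_positions_with_nb_squares word i (positions_with_nb_squares word i)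

-- ===== LEMMAS AND PROOFS =====

-- `word[a:b]` for natural bounds
def sliceN (w : String) (a b : ℕ) : String := PySem.Str.slice w (some (a : Int)) (some (b : Int))

-- the halves of the even-length squares ending at position p, shortest first, cut off after k lengths
def upTo (w : String) (p k : ℕ) : List String :=
  (List.range k).filterMap (fun j =>
    if sliceN w (p - 2 * (j + 1)) (p - (j + 1)) = sliceN w (p - (j + 1)) p
    then some (sliceN w (p - (j + 1)) p) else none)

def halvesAt (w : String) (p : ℕ) : List String := upTo w p (p / 2)

-- all halves of squares ending at positions 1..r
def flatH (w : String) (r : ℕ) : List String := (List.range r).flatMap (fun t => halvesAt w (t + 1))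

-- the least position p ≤ m at which u is the half of a square ending at p
def leastOcc (w u : String) : ℕ → Option ℕ
  | 0 => none
  | m + 1 => match leastOcc w u m with
      | some p => some p
      | none => if u ∈ halvesAt w (m + 1) then some (m + 1) else none

-- the key A's inner loop inserts for begin b, end e
def keyOf (w : String) (b e : ℕ) : String :=
  PySem.Str.slice w (some (b : Int)) (some ((b : Int) + PySem.Int.floordiv ((e : Int) - (b : Int) + 1) 2))

-- the keys A's inner loop for end e inserts, over b < m
def lowKeys (w : String) (e m : ℕ) : List String :=
  (List.range m).filterMap (fun (b : ℕ) => if is_square w ((b : ℕ) : Int) ((e : ℕ) : Int) then some (keyOf w b e) else none)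

-- the halves first appearing at position q (what B counts at q)
def newAt (w : String) (q : ℕ) : List String :=
  (halvesAt w q).filter (fun u => !decide (u ∈ flatH w (q - 1)))

lemma toList_sliceN (w : String) (a b : ℕ) :
    (sliceN w a b).toList = (w.toList.drop a).take (b - a) := by
  simp [sliceN, PySem.Str.toList_slice, PySem.Chars.slice_eq_listSlice, PySem.List.slice_natCast]

lemma length_sliceN (w : String) (a b : ℕ) (hb : b ≤ w.toList.length) (hab : a ≤ b) :
    (sliceN w a b).toList.length = b - a := by
  rw [toList_sliceN, List.length_take, List.length_drop]
  omega

lemma mem_upTo_iff (w : String) (p k u) :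
    u ∈ upTo w p k ↔ ∃ L, 1 ≤ L ∧ L ≤ k ∧
      sliceN w (p - 2 * L) (p - L) = sliceN w (p - L) p ∧ u = sliceN w (p - L) p := by
  simp only [upTo, List.mem_filterMap, List.mem_range, Option.ite_none_right_eq_some,
    Option.some.injEq]
  constructor
  · rintro ⟨j, hj, hc, rfl⟩
    exact ⟨j + 1, by omega, by omega, hc, rfl⟩
  · rintro ⟨L, h1, h2, hc, rfl⟩
    refine ⟨L - 1, by omega, ?_⟩
    have hL : L - 1 + 1 = L := by omega
    rw [hL]
    exact ⟨hc, rfl⟩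

lemma mem_halvesAt_iff (w : String) (p u) :
    u ∈ halvesAt w p ↔ ∃ L, 1 ≤ L ∧ 2 * L ≤ p ∧
      sliceN w (p - 2 * L) (p - L) = sliceN w (p - L) p ∧ u = sliceN w (p - L) p := by
  rw [halvesAt, mem_upTo_iff]
  constructor
  · rintro ⟨L, h1, h2, hc, rfl⟩
    exact ⟨L, h1, by omega, hc, rfl⟩
  · rintro ⟨L, h1, h2, hc, rfl⟩
    exact ⟨L, h1, by omega, hc, rfl⟩

lemma length_of_mem_upTo (w : String) (p k u) (hp : p ≤ w.toList.length) (hk : 2 * k ≤ p)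
    (h : u ∈ upTo w p k) : 1 ≤ u.toList.length ∧ u.toList.length ≤ k := by
  rcases (mem_upTo_iff w p k u).1 h with ⟨L, h1, h2, _, rfl⟩
  have := length_sliceN w (p - L) p hp (by omega)
  omega

lemma upTo_succ (w : String) (p k : ℕ) :
    upTo w p (k + 1) = upTo w p k ++
      (if sliceN w (p - 2 * (k + 1)) (p - (k + 1)) = sliceN w (p - (k + 1)) p
       then [sliceN w (p - (k + 1)) p] else []) := by
  rw [upTo, List.range_succ, List.filterMap_append]
  congr 1
  split <;> simp_all

lemma sliceN_not_mem_upTo (w : String) (p k : ℕ) (hp : p ≤ w.toList.length)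
    (hk : 2 * (k + 1) ≤ p) : sliceN w (p - (k + 1)) p ∉ upTo w p k := by
  intro h
  have h1 := length_of_mem_upTo w p k _ hp (by omega) h
  have h2 := length_sliceN w (p - (k + 1)) p hp (by omega)
  omega

lemma nodup_upTo (w : String) (p : ℕ) (hp : p ≤ w.toList.length) :
    ∀ k, 2 * k ≤ p → (upTo w p k).Nodup := by
  intro k
  induction k with
  | zero => intro _; simp [upTo]
  | succ k ih =>
    intro hk
    rw [upTo_succ]
    split
    · refine (ih (by omega)).append (by simp) ?_
      intro a ha hb
      rw [List.mem_singleton] at hb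
      exact sliceN_not_mem_upTo w p k hp hk (hb ▸ ha)
    · rw [List.append_nil]
      exact ih (by omega)

lemma nodup_halvesAt (w : String) (p : ℕ) (hp : p ≤ w.toList.length) : (halvesAt w p).Nodup :=
  nodup_upTo w p hp _ (by omega)

lemma empty_not_mem_halvesAt (w : String) (p : ℕ) (hp : p ≤ w.toList.length) :
    "" ∉ halvesAt w p := by
  intro h
  have := length_of_mem_upTo w p (p / 2) _ hp (by omega) h
  simp at this

lemma leastOcc_mem (w u : String) (m p : ℕ) (h : leastOcc w u m = some p) :
    1 ≤ p ∧ p ≤ m ∧ u ∈ halvesAt w p := by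
  induction m with
  | zero => simp [leastOcc] at h
  | succ m ih =>
    rw [leastOcc] at h
    rcases hm : leastOcc w u m with _ | p' <;> simp only [hm] at h
    · split at h
      · rename_i hmem
        obtain rfl : m + 1 = p := by simpa using h
        exact ⟨by omega, le_refl _, hmem⟩
      · simp at h
    · obtain rfl : p' = p := by simpa using h
      have := ih hm
      exact ⟨this.1, by omega, this.2.2⟩

lemma leastOcc_none (w u : String) (m : ℕ) :
    leastOcc w u m = none ↔ ∀ q, 1 ≤ q → q ≤ m → u ∉ halvesAt w q := by
  induction m with
  | zero =>
    simp only [leastOcc, true_iff]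
    intro q h1 h2
    omega
  | succ m ih =>
    rw [leastOcc]
    rcases hm : leastOcc w u m with _ | p' <;> simp only [hm]
    · have hforall := ih.1 hm
      split
      · rename_i hmem
        simp only [reduceCtorEq, false_iff]
        intro hall
        exact hall (m + 1) (by omega) (by omega) hmem
      · rename_i hmem
        simp only [true_iff]
        intro q h1 h2
        by_cases hq : q ≤ m
        · exact hforall q h1 hq
        · obtain rfl : q = m + 1 := by omega
          exact hmem
    · simp only [reduceCtorEq, false_iff]
      intro hall
      have := leastOcc_mem w u m p' hm
      exact hall p' this.1 (by omega) this.2.2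

lemma leastOcc_spec (w u : String) (m p : ℕ) :
    leastOcc w u m = some p ↔
      1 ≤ p ∧ p ≤ m ∧ u ∈ halvesAt w p ∧ ∀ q, 1 ≤ q → q < p → u ∉ halvesAt w q := by
  induction m generalizing p with
  | zero =>
    constructor
    · intro h
      simp [leastOcc] at h
    · rintro ⟨h1, h2, _⟩
      omega
  | succ m ih =>
    rw [leastOcc]
    rcases hm : leastOcc w u m with _ | p' <;> simp only [hm]
    · have hnone := (leastOcc_none w u m).1 hm
      split
      · rename_i hmem
        simp only [Option.some.injEq]
        constructor
        · rintro rfl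
          exact ⟨by omega, le_refl _, hmem, fun q h1 h2 => hnone q h1 (by omega)⟩
        · rintro ⟨h1, h2, h3, h4⟩
          by_cases hpm : p ≤ m
          · exact absurd h3 (hnone p h1 hpm)
          · omega
      · rename_i hmem
        simp only [reduceCtorEq, false_iff]
        rintro ⟨h1, h2, h3, h4⟩
        by_cases hpm : p ≤ m
        · exact absurd h3 (hnone p h1 hpm)
        · obtain rfl : p = m + 1 := by omega
          exact hmem h3
    · have hspec := (ih p').1 hm
      simp only [Option.some.injEq]
      constructor
      · rintro rfl
        exact ⟨hspec.1, by omega, hspec.2.2.1, hspec.2.2.2⟩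
      · rintro ⟨h1, h2, h3, h4⟩
        rcases Nat.lt_trichotomy p p' with hlt | heq | hgt
        · exact absurd h3 (hspec.2.2.2 p h1 hlt)
        · omega
        · exact absurd hspec.2.2.1 (h4 p' hspec.1 hgt)

lemma leastOcc_empty (w : String) (m : ℕ) (hm : m ≤ w.toList.length) :
    leastOcc w "" m = none := by
  rw [leastOcc_none]
  intro q h1 h2
  exact empty_not_mem_halvesAt w q (by omega)

lemma is_square_nat (w : String) (b e : ℕ) (hbe : b ≤ e) :
    is_square w (b : Int) (e : Int) = true ↔
      (e - b + 1) % 2 = 0 ∧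
        sliceN w b (b + (e - b + 1) / 2) = sliceN w (b + (e - b + 1) / 2) (e + 1) := by
  unfold is_square
  simp only [show (e : Int) - (b : Int) + 1 = ((e - b + 1 : ℕ) : Int) from by omega,
    show PySem.Int.mod ((e - b + 1 : ℕ) : Int) 2 = (((e - b + 1) % 2 : ℕ) : Int) from by
      exact_mod_cast PySem.Int.mod_natCast (e - b + 1) 2,
    show PySem.Int.floordiv ((e - b + 1 : ℕ) : Int) 2 = (((e - b + 1) / 2 : ℕ) : Int) from by
      exact_mod_cast PySem.Int.floordiv_natCast (e - b + 1) 2,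
    show (b : Int) + (((e - b + 1) / 2 : ℕ) : Int) = ((b + (e - b + 1) / 2 : ℕ) : Int) from by
      push_cast; ring,
    show (e : Int) + 1 = ((e + 1 : ℕ) : Int) from by push_cast; ring]
  rcases Nat.mod_two_eq_zero_or_one (e - b + 1) with h2 | h2 <;>
    simp [h2, sliceN, beq_iff_eq]

lemma keyOf_eq (w : String) (b e : ℕ) (hbe : b ≤ e) :
    keyOf w b e = sliceN w b (b + (e - b + 1) / 2) := by
  unfold keyOf sliceN
  rw [show (e : Int) - (b : Int) + 1 = ((e - b + 1 : ℕ) : Int) from by omega,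
    show PySem.Int.floordiv ((e - b + 1 : ℕ) : Int) 2 = (((e - b + 1) / 2 : ℕ) : Int) from by
      exact_mod_cast PySem.Int.floordiv_natCast (e - b + 1) 2]
  norm_cast

lemma lowKeys_full (w : String) (e u) : u ∈ lowKeys w e (e + 1) ↔ u ∈ halvesAt w (e + 1) := by
  rw [mem_halvesAt_iff]
  simp only [lowKeys, List.mem_filterMap, List.mem_range]
  constructor
  · rintro ⟨b, hb, hif⟩
    rw [ite_eq_iff] at hif
    rcases hif with ⟨hsq, hu⟩ | ⟨_, hu⟩
    · rw [is_square_nat w b e (by omega)] at hsq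
      obtain ⟨h2, hsl⟩ := hsq
      set L := (e - b + 1) / 2 with hL
      refine ⟨L, by omega, by omega, ?_, ?_⟩
      · rw [show e + 1 - 2 * L = b from by omega, show e + 1 - L = b + L from by omega]
        exact hsl
      · obtain rfl : keyOf w b e = u := by simpa using hu
        rw [keyOf_eq w b e (by omega), show e + 1 - L = b + L from by omega]
        exact hsl
    · simp at hu
  · rintro ⟨L, h1, h2, hc, rfl⟩
    refine ⟨e + 1 - 2 * L, by omega, ?_⟩
    have hb : e - (e + 1 - 2 * L) + 1 = 2 * L := by omega
    have hsq : is_square w ((e + 1 - 2 * L : ℕ) : Int) (e : Int) = true := by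
      rw [is_square_nat w _ e (by omega), hb]
      refine ⟨by omega, ?_⟩
      rw [show 2 * L / 2 = L from by omega, show e + 1 - 2 * L + L = e + 1 - L from by omega]
      exact hc
    rw [if_pos hsq]
    simp only [Option.some.injEq]
    rw [keyOf_eq w _ e (by omega), hb, show 2 * L / 2 = L from by omega,
      show e + 1 - 2 * L + L = e + 1 - L from by omega]
    exact hc
lemma innerA (w : String) (e : ℕ) :
    ∀ (m : ℕ) (d : PySem.Dict String Int) (u : String),
    ((PySem.List.pyRange ((m : Int) - 1) (-1) (-1)).foldl
        (fun sp beg_pos => if is_square w beg_pos (e : Int) then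
          sp.insert (PySem.Str.slice w (some beg_pos)
            (some (beg_pos + PySem.Int.floordiv ((e : Int) - beg_pos + 1) 2))) ((e : Int) + 1)
          else sp) d).get? u
      = if u ∈ lowKeys w e m then some ((e : Int) + 1) else d.get? u := by
  intro m
  induction m with
  | zero =>
    intro d u
    rw [show ((0 : ℕ) : Int) - 1 = (-1 : Int) from by norm_num,
      PySem.List.pyRange_neg_one_eq_nil (by norm_num)]
    simp [lowKeys]
  | succ m ih =>
    intro d u
    rw [show ((m + 1 : ℕ) : Int) - 1 = (m : Int) from by push_cast; ring,
      PySem.List.pyRange_neg_one_cons (by omega),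
      List.foldl_cons]
    rw [show ((m : Int) - 1) = ((m : ℕ) : Int) - 1 from rfl]
    rw [ih]
    have hsplit : lowKeys w e (m + 1) = lowKeys w e m ++
        (if is_square w (m : Int) (e : Int) then [keyOf w m e] else []) := by
      rw [lowKeys, List.range_succ, List.filterMap_append]
      congr 1
      split <;> simp_all [lowKeys]
    rw [hsplit]
    by_cases hmem : u ∈ lowKeys w e m
    · rw [if_pos hmem, if_pos (List.mem_append_left _ hmem)]
    · rw [if_neg hmem]
      by_cases hsq : is_square w (m : Int) (e : Int) = true
      · rw [if_pos hsq, if_pos hsq,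
          show PySem.Str.slice w (some (m : Int))
              (some ((m : Int) + PySem.Int.floordiv ((e : Int) - (m : Int) + 1) 2))
            = keyOf w m e from rfl,
          PySem.Dict.get?_insert]
        by_cases hu : u = keyOf w m e
        · rw [if_pos hu, if_pos (by simp [hu])]
        · rw [if_neg hu, if_neg (by simp [hmem, hu])]
      · rw [if_neg hsq, if_neg hsq, List.append_nil, if_neg hmem]

lemma innerA_full (w : String) (e : ℕ) (d : PySem.Dict String Int) (u : String) :
    ((PySem.List.pyRange (e : Int) (-1) (-1)).foldl
        (fun sp beg_pos => if is_square w beg_pos (e : Int) then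
          sp.insert (PySem.Str.slice w (some beg_pos)
            (some (beg_pos + PySem.Int.floordiv ((e : Int) - beg_pos + 1) 2))) ((e : Int) + 1)
          else sp) d).get? u
      = if u ∈ halvesAt w (e + 1) then some ((e : Int) + 1) else d.get? u := by
  have h := innerA w e (e + 1) d u
  rw [show ((e + 1 : ℕ) : Int) - 1 = (e : Int) from by push_cast; ring] at h
  rw [h, if_congr (lowKeys_full w e u) rfl rfl]

lemma outerA (w : String) :
    ∀ (m : ℕ) (d : PySem.Dict String Int) (u : String),
    ((PySem.List.pyRange ((m : Int) - 1) (-1) (-1)).foldl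
        (fun sp end_pos => (PySem.List.pyRange end_pos (-1) (-1)).foldl
          (fun sp beg_pos => if is_square w beg_pos end_pos then
            sp.insert (PySem.Str.slice w (some beg_pos)
              (some (beg_pos + PySem.Int.floordiv (end_pos - beg_pos + 1) 2))) (end_pos + 1)
            else sp) sp) d).get? u
      = match leastOcc w u m with | some p => some (p : Int) | none => d.get? u := by
  intro m
  induction m with
  | zero =>
    intro d u
    rw [show ((0 : ℕ) : Int) - 1 = (-1 : Int) from by norm_num,
      PySem.List.pyRange_neg_one_eq_nil (by norm_num)]
    simp [leastOcc]
  | succ m ih =>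
    intro d u
    rw [show ((m + 1 : ℕ) : Int) - 1 = (m : Int) from by push_cast; ring,
      PySem.List.pyRange_neg_one_cons (by omega), List.foldl_cons]
    rw [show ((m : Int) - 1) = ((m : ℕ) : Int) - 1 from rfl, ih]
    conv_rhs => rw [leastOcc]
    rcases hm : leastOcc w u m with _ | p'
    · simp only [hm, innerA_full w m]
      split <;> simp
    · simp only [hm]

lemma len_str (w : String) : PySem.Str.len w = (w.toList.length : Int) :=
  PySem.Str.len_eq w

lemma get?_inventory (w : String) (u : String) :
    (squares_inventory w).get? u =
      if u = "" then some 0 else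
        (match leastOcc w u w.toList.length with | some p => some (p : Int) | none => none) := by
  unfold squares_inventory
  rw [len_str]
  rw [PySem.Dict.get?_insert]
  split
  · rfl
  · rw [outerA w w.toList.length PySem.Dict.empty u]
    rcases leastOcc w u w.toList.length with _ | p
    · exact PySem.Dict.get?_empty _
    · rfl

lemma nodup_keys_foldl_ite {ι : Type} (l : List ι) (c : ι → Bool) (k : ι → String)
    (v : ι → Int) :
    ∀ d : PySem.Dict String Int, d.keys.Nodup →
      ((l.foldl (fun sp x => if c x then sp.insert (k x) (v x) else sp) d)).keys.Nodup := by
  induction l with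
  | nil => intro d h; exact h
  | cons x l ih =>
    intro d h
    rw [List.foldl_cons]
    apply ih
    split
    · exact PySem.Dict.nodup_keys_insert _ _ _ h
    · exact h

lemma nodup_keys_foldl_step {ι : Type} (l : List ι) (f : PySem.Dict String Int → ι → PySem.Dict String Int)
    (hf : ∀ d x, d.keys.Nodup → (f d x).keys.Nodup) :
    ∀ d, d.keys.Nodup → (l.foldl f d).keys.Nodup := by
  induction l with
  | nil => intro d h; exact h
  | cons x l ih =>
    intro d h
    rw [List.foldl_cons]
    exact ih _ (hf d x h)

lemma nodup_keys_inventory (w : String) : (squares_inventory w).keys.Nodup := by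
  unfold squares_inventory
  apply PySem.Dict.nodup_keys_insert
  apply nodup_keys_foldl_step
  · intro d x h
    exact nodup_keys_foldl_ite _ _ _ _ d h
  · exact PySem.Dict.nodup_keys_empty

lemma mem_keys_inventory (w : String) (u : String) :
    u ∈ (squares_inventory w).keys ↔ (u = "" ∨ leastOcc w u w.toList.length ≠ none) := by
  have h := get?_inventory w u
  rw [← PySem.Dict.contains_iff_mem_keys]
  constructor
  · intro hmem
    by_cases hu : u = ""
    · exact Or.inl hu
    · right
      intro hnone
      rw [if_neg hu, hnone] at h
      rw [PySem.Dict.get?_eq_none_iff_contains] at h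
      rw [h] at hmem
      simp at hmem
  · intro hor
    by_contra hc
    have hfalse : (squares_inventory w).contains u = false := by
      cases hcc : (squares_inventory w).contains u
      · rfl
      · exact absurd hcc hc
    have hnone := (PySem.Dict.get?_eq_none_iff_contains _ _).2 hfalse
    rw [h] at hnone
    rcases hor with rfl | hsome
    · simp at hnone
    · rcases hls : leastOcc w u w.toList.length with _ | p
      · exact hsome hls
      · rw [if_neg ?_, hls] at hnone
        · simp at hnone
        · rintro rfl
          rw [leastOcc_empty w _ (le_refl _)] at hls
          simp at hls

lemma pyGetD_pySetD_int (xs : List Int) (i v : Int) (q : ℕ) (h0 : 0 ≤ i)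
    (hlen : i.toNat < xs.length) :
    PySem.List.pyGetD (PySem.List.pySetD xs i v) (q : Int) 0
      = if q = i.toNat then v else PySem.List.pyGetD xs (q : Int) 0 := by
  rw [show i = ((i.toNat : ℕ) : Int) from by omega]
  rw [PySem.List.pyGetD_pySetD_natCast _ _ _ _ _ (by simpa using hlen)]
  rw [Int.toNat_natCast]

lemma counterFold (vs : List Int) :
    ∀ (nb : List Int), (∀ v ∈ vs, 0 ≤ v ∧ v.toNat < nb.length) → ∀ q : ℕ,
    PySem.List.pyGetD
        (vs.foldl (fun nb v => PySem.List.pySetD nb v (PySem.List.pyGetD nb v 0 + 1)) nb)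
        (q : Int) 0
      = PySem.List.pyGetD nb (q : Int) 0 + (vs.count (q : Int) : Int) := by
  induction vs with
  | nil => intro nb _ q; simp
  | cons v vs ih =>
    intro nb h q
    obtain ⟨hv0, hvlen⟩ := h v (by simp)
    rw [List.foldl_cons]
    rw [ih _ (by
      intro x hx
      have := h x (by simp [hx])
      rw [PySem.List.length_pySetD]
      exact this)]
    rw [pyGetD_pySetD_int nb v _ q hv0 hvlen, List.count_cons]
    by_cases hq : q = v.toNat
    · subst hq
      have hbeq : (v == ((v.toNat : ℕ) : Int)) = true := by
        simp only [beq_iff_eq]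
        omega
      simp only [hbeq, if_true]
      rw [show v = ((v.toNat : ℕ) : Int) from by omega, Int.toNat_natCast]
      push_cast
      ring
    · have hbeq : (v == ((q : ℕ) : Int)) = false := by
        simp only [beq_eq_false_iff_ne, ne_eq]
        omega
      simp only [if_neg hq, hbeq, Bool.false_eq_true, if_false]
      push_cast
      ring

lemma getD_inventory (w : String) (u : String) :
    (squares_inventory w).getD u 0 =
      if u = "" then 0 else
        (match leastOcc w u w.toList.length with | some p => (p : Int) | none => 0) := by
  rw [PySem.Dict.getD_eq_get?_getD, get?_inventory]
  split
  · rfl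
  · rcases leastOcc w u w.toList.length with _ | p <;> rfl

lemma pyGetD_zeros (w : String) (q : Int) :
    PySem.List.pyGetD ((PySem.List.pyRange 0 ((w.toList.length : Int) + 1) 1).map
      (fun _ => (0 : Int))) q 0 = 0 := by
  rcases h : PySem.List.pyGet? ((PySem.List.pyRange 0 ((w.toList.length : Int) + 1) 1).map
      (fun _ => (0 : Int))) q with _ | x
  · exact PySem.List.pyGetD_of_none _ _ _ h
  · have hx := PySem.List.mem_of_pyGet?_eq_some _ h
    simp only [List.mem_map] at hx
    obtain ⟨_, _, rfl⟩ := hx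
    show (PySem.List.pyGet? _ q).getD 0 = 0
    rw [h]
    rfl

lemma values_bound (w : String) :
    ∀ v ∈ (squares_inventory w).keys.map (fun u => (squares_inventory w).getD u 0),
      0 ≤ v ∧ v.toNat < w.toList.length + 1 := by
  intro v hv
  simp only [List.mem_map] at hv
  obtain ⟨u, hu, rfl⟩ := hv
  rw [getD_inventory]
  split
  · omega
  · rcases hls : leastOcc w u w.toList.length with _ | p <;> simp only [hls]
    · simp
    · have := leastOcc_mem w u _ p hls
      refine ⟨by exact_mod_cast Nat.zero_le p, ?_⟩
      rw [Int.toNat_natCast]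
      omega

lemma distrib_eq (w : String) (q : ℕ) :
    PySem.List.pyGetD
        (squares_distribution (squares_inventory w) ((w.toList.length : ℕ) : Int)) (q : Int) 0
      = (((squares_inventory w).keys).countP
          (fun u => (squares_inventory w).getD u 0 == (q : Int)) : Int) := by
  unfold squares_distribution
  rw [← List.foldl_map (f := fun u => (squares_inventory w).getD u 0)
    (g := fun nb v => PySem.List.pySetD nb v (PySem.List.pyGetD nb v 0 + 1))]
  rw [counterFold _ _ (by
      intro v hv
      have := values_bound w v hv
      constructor
      · exact this.1
      · rw [List.length_map, PySem.List.length_pyRange_one]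
        omega) q]
  rw [pyGetD_zeros]
  rw [List.count_eq_countP, List.countP_map]
  simp only [Function.comp_def]
  omega

lemma count_A_zero (w : String) :
    ((squares_inventory w).keys).countP (fun u => (squares_inventory w).getD u 0 == (0 : Int)) = 1 := by
  rw [List.countP_eq_length_filter]
  have hperm : ((squares_inventory w).keys.filter
      (fun u => (squares_inventory w).getD u 0 == (0 : Int))).Perm [""] := by
    rw [List.perm_ext_iff_of_nodup ((nodup_keys_inventory w).filter _) (by simp)]
    intro u
    simp only [List.mem_filter, List.mem_singleton]
    constructor
    · rintro ⟨hmem, hval⟩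
      by_contra hu
      rw [getD_inventory, if_neg hu] at hval
      rcases hls : leastOcc w u w.toList.length with _ | p
      · rcases (mem_keys_inventory w u).1 hmem with rfl | hne
        · exact hu rfl
        · exact hne hls
      · rw [hls] at hval
        have := leastOcc_mem w u _ p hls
        simp only [beq_iff_eq] at hval
        omega
    · rintro rfl
      refine ⟨(mem_keys_inventory w _).2 (Or.inl rfl), ?_⟩
      rw [getD_inventory, if_pos rfl]
      rfl
  rw [hperm.length_eq]
  rfl

lemma count_A_pos (w : String) (q : ℕ) (h1 : 1 ≤ q) (hq : q ≤ w.toList.length) :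
    ((squares_inventory w).keys).countP (fun u => (squares_inventory w).getD u 0 == (q : Int))
      = (newAt w q).length := by
  rw [List.countP_eq_length_filter]
  have hmemflat : ∀ u r, u ∈ flatH w r ↔ ∃ t, t < r ∧ u ∈ halvesAt w (t + 1) := by
    intro u r
    simp [flatH, List.mem_flatMap, List.mem_range]
  have hchar : ∀ u, leastOcc w u w.toList.length = some q ↔ u ∈ newAt w q := by
    intro u
    rw [leastOcc_spec]
    unfold newAt
    simp only [List.mem_filter, Bool.not_eq_eq_eq_not, Bool.not_true, decide_eq_false_iff_not,
      hmemflat]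
    constructor
    · rintro ⟨_, _, hmem, hmin⟩
      exact ⟨hmem, by rintro ⟨t, ht, hmem'⟩; exact hmin (t + 1) (by omega) (by omega) hmem'⟩
    · rintro ⟨hmem, hnot⟩
      exact ⟨h1, hq, hmem, fun q' hq1 hq2 hmem' => hnot ⟨q' - 1, by omega,
        by rw [show q' - 1 + 1 = q' from by omega]; exact hmem'⟩⟩
  have hperm : ((squares_inventory w).keys.filter
      (fun u => (squares_inventory w).getD u 0 == (q : Int))).Perm (newAt w q) := by
    have hnodupB : (newAt w q).Nodup := by
      unfold newAt
      exact (nodup_halvesAt w q hq).filter _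
    rw [List.perm_ext_iff_of_nodup ((nodup_keys_inventory w).filter _) hnodupB]
    intro u
    rw [List.mem_filter]
    constructor
    · rintro ⟨hmem, hval⟩
      rw [← hchar u]
      have hu : u ≠ "" := by
        rintro rfl
        rw [getD_inventory, if_pos rfl] at hval
        simp only [beq_iff_eq] at hval
        omega
      rw [getD_inventory, if_neg hu] at hval
      rcases hls : leastOcc w u w.toList.length with _ | p
      · rcases (mem_keys_inventory w u).1 hmem with rfl | hne
        · exact absurd rfl hu
        · exact absurd hls hne
      · rw [hls] at hval
        simp only [beq_iff_eq] at hval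
        obtain rfl : p = q := by exact_mod_cast hval
        rfl
    · intro hmem
      have hls := (hchar u).2 hmem
      refine ⟨(mem_keys_inventory w u).2 (Or.inr (by rw [hls]; simp)), ?_⟩
      have hu : u ≠ "" := by
        rintro rfl
        rw [leastOcc_empty w _ (le_refl _)] at hls
        simp at hls
      rw [getD_inventory, if_neg hu, hls]
      simp
  rw [hperm.length_eq]

set_option maxHeartbeats 1000000 in
lemma innerB (w : String) (p : ℕ) (hp : p ≤ w.toList.length) :
    ∀ (k : ℕ), 2 * k ≤ p → ∀ (c : List Int) (s : PySem.Set String), p < c.length →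
    ∀ st', st' = (PySem.List.pyRange 1 ((k : Int) + 1) 1).foldl (fun st L =>
        let half := PySem.Str.slice w (some ((p : Int) - L)) (some (p : Int))
        if !(PySem.Set.contains st.2 half) &&
            (PySem.Str.slice w (some ((p : Int) - 2 * L)) (some ((p : Int) - L)) == half)
        then (PySem.List.pySetD st.1 (p : Int) (PySem.List.pyGetD st.1 (p : Int) 0 + 1),
              PySem.Set.add st.2 half)
        else st) (c, s) →
      st'.1.length = c.length ∧
      (∀ q : ℕ, PySem.List.pyGetD st'.1 (q : Int) 0 =
        if q = p then PySem.List.pyGetD c (p : Int) 0 +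
          (((upTo w p k).filter (fun u => !(PySem.Set.contains s u))).length : Int)
        else PySem.List.pyGetD c (q : Int) 0) ∧
      (∀ u, u ∈ st'.2 ↔ u ∈ s ∨ u ∈ upTo w p k) := by
  intro k
  induction k with
  | zero =>
    intro _ c s hc st' hst'
    rw [show ((0 : ℕ) : Int) + 1 = 1 from by norm_num,
      PySem.List.pyRange_one_eq_nil (by norm_num), List.foldl_nil] at hst'
    subst hst'
    refine ⟨rfl, ?_, ?_⟩
    · intro q
      split <;> simp [upTo]
      · rename_i h; rw [h]
    · intro u
      simp [upTo]
  | succ k ih =>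
    intro hk c s hc st' hst'
    rw [show ((k + 1 : ℕ) : Int) + 1 = ((k : Int) + 1) + 1 from by push_cast; ring,
      PySem.List.pyRange_one_succ_right (by omega),
      List.foldl_append, List.foldl_cons, List.foldl_nil] at hst'
    obtain ⟨h1, h2, h3⟩ := ih (by omega) c s hc _ rfl
    set stk := (PySem.List.pyRange 1 ((k : Int) + 1) 1).foldl _ (c, s) with hstk
    rw [show ((k : Int) + 1) = ((k + 1 : ℕ) : Int) from by push_cast; ring,
      show (p : Int) - ((k + 1 : ℕ) : Int) = ((p - (k + 1) : ℕ) : Int) from by omega,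
      show (p : Int) - 2 * ((k + 1 : ℕ) : Int) = ((p - 2 * (k + 1) : ℕ) : Int) from by omega]
      at hst'
    simp only at hst'
    have hhalf : PySem.Str.slice w (some ((p - (k + 1) : ℕ) : Int)) (some (p : Int))
        = sliceN w (p - (k + 1)) p := rfl
    have hleft : PySem.Str.slice w (some ((p - 2 * (k + 1) : ℕ) : Int))
        (some ((p - (k + 1) : ℕ) : Int)) = sliceN w (p - 2 * (k + 1)) (p - (k + 1)) := rfl
    rw [hhalf, hleft] at hst'
    have hnotin : sliceN w (p - (k + 1)) p ∉ upTo w p k := sliceN_not_mem_upTo w p k hp hk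
    by_cases hsq : sliceN w (p - 2 * (k + 1)) (p - (k + 1)) = sliceN w (p - (k + 1)) p
    · by_cases hs : sliceN w (p - (k + 1)) p ∈ s
      · -- seen before: no change
        have hcont : PySem.Set.contains stk.2 (sliceN w (p - (k + 1)) p) = true :=
          (PySem.Set.contains_iff _ _).2 ((h3 _).2 (Or.inl hs))
        rw [hcont] at hst'
        simp only [Bool.not_true, Bool.false_and, Bool.false_eq_true, if_false] at hst'
        subst hst'
        refine ⟨h1, ?_, ?_⟩
        · intro q
          rw [h2 q]
          have hconts : PySem.Set.contains s (sliceN w (p - (k + 1)) p) = true :=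
            (PySem.Set.contains_iff _ _).2 hs
          rw [upTo_succ, if_pos hsq, List.filter_append]
          simp [hs]
        · intro u
          rw [h3 u, upTo_succ, if_pos hsq]
          simp only [List.mem_append, List.mem_singleton]
          constructor
          · rintro (ha | hb)
            · exact Or.inl ha
            · exact Or.inr (Or.inl hb)
          · rintro (ha | hb | rfl)
            · exact Or.inl ha
            · exact Or.inr hb
            · exact Or.inl hs
      · -- new half: count it
        have hcont : PySem.Set.contains stk.2 (sliceN w (p - (k + 1)) p) = false := by
          rw [← Bool.not_eq_true, PySem.Set.contains_iff]
          intro hmem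
          rcases (h3 _).1 hmem with ha | hb
          · exact hs ha
          · exact hnotin hb
        have hbeq : (sliceN w (p - 2 * (k + 1)) (p - (k + 1)) == sliceN w (p - (k + 1)) p)
            = true := by simp [hsq]
        rw [hcont, hbeq] at hst'
        simp only [Bool.not_false, Bool.true_and, if_true] at hst'
        subst hst'
        have hplen : ((p : Int)).toNat < stk.1.length := by
          rw [h1]; simpa using hc
        refine ⟨by rw [PySem.List.length_pySetD, h1], ?_, ?_⟩
        · intro q
          rw [pyGetD_pySetD_int _ _ _ q (by omega) hplen, Int.toNat_natCast]
          have hconts : PySem.Set.contains s (sliceN w (p - (k + 1)) p) = false := by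
            rw [← Bool.not_eq_true, PySem.Set.contains_iff]
            exact hs
          rw [upTo_succ, if_pos hsq, List.filter_append]
          by_cases hq : q = p
          · rw [if_pos hq, if_pos hq, h2 p, if_pos rfl]
            simp [hs]
            ring
          · rw [if_neg hq, if_neg hq, h2 q, if_neg hq]
        · intro u
          rw [PySem.Set.mem_add, h3 u, upTo_succ, if_pos hsq]
          simp only [List.mem_append, List.mem_singleton]
          tauto
    · -- not a square: no change
      have hbeq : (sliceN w (p - 2 * (k + 1)) (p - (k + 1)) == sliceN w (p - (k + 1)) p)
          = false := by simp [beq_eq_false_iff_ne, hsq]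
      rw [hbeq] at hst'
      simp only [Bool.and_false, Bool.false_eq_true, if_false] at hst'
      subst hst'
      rw [upTo_succ, if_neg hsq, List.append_nil]
      exact ⟨h1, h2, h3⟩

lemma flatH_succ (w : String) (r : ℕ) :
    flatH w (r + 1) = flatH w r ++ halvesAt w (r + 1) := by
  simp [flatH, List.range_succ]

set_option maxHeartbeats 1000000 in
lemma outerB (w : String) :
    ∀ (P : ℕ), 1 ≤ P → P ≤ w.toList.length →
    ∀ (c : List Int), c.length = w.toList.length + 1 →
    (∀ q : ℕ, PySem.List.pyGetD c (q : Int) 0 = if q = 0 then 1 else 0) →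
    ∀ st', st' = (PySem.List.pyRange 2 ((P : Int) + 1) 1).foldl (fun st p =>
        (PySem.List.pyRange 1 (PySem.Int.floordiv p 2 + 1) 1).foldl (fun st L =>
          let half := PySem.Str.slice w (some (p - L)) (some p)
          if !(PySem.Set.contains st.2 half) &&
              (PySem.Str.slice w (some (p - 2 * L)) (some (p - L)) == half)
          then (PySem.List.pySetD st.1 p (PySem.List.pyGetD st.1 p 0 + 1), PySem.Set.add st.2 half)
          else st) st) (c, (PySem.Set.empty : PySem.Set String)) →
      st'.1.length = w.toList.length + 1 ∧
      (∀ q : ℕ, PySem.List.pyGetD st'.1 (q : Int) 0 =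
        if q = 0 then 1 else if 2 ≤ q ∧ q ≤ P then ((newAt w q).length : Int) else 0) ∧
      (∀ u, u ∈ st'.2 ↔ u ∈ flatH w P) := by
  intro P
  induction P with
  | zero => omega
  | succ P ih =>
    intro _ hPN c hc hc0 st' hst'
    by_cases hP : P = 0
    · subst hP
      rw [show ((0 + 1 : ℕ) : Int) + 1 = 2 from by norm_num,
        PySem.List.pyRange_one_eq_nil (by norm_num), List.foldl_nil] at hst'
      subst hst'
      refine ⟨hc, ?_, ?_⟩
      · intro q
        rw [hc0 q]
        split
        · rfl
        · rw [if_neg (by omega)]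
      · intro u
        simp [flatH, halvesAt, upTo, PySem.Set.empty]
    · -- 1 ≤ P
      rw [show ((P + 1 : ℕ) : Int) + 1 = ((P : Int) + 1) + 1 from by push_cast; ring,
        PySem.List.pyRange_one_succ_right (by omega),
        List.foldl_append, List.foldl_cons, List.foldl_nil] at hst'
      obtain ⟨h1, h2, h3⟩ := ih (by omega) (by omega) c hc hc0 _ rfl
      set stP := (PySem.List.pyRange 2 ((P : Int) + 1) 1).foldl _
        (c, (PySem.Set.empty : PySem.Set String)) with hstP
      rw [show ((P : Int) + 1) = ((P + 1 : ℕ) : Int) from by push_cast; ring,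
        show PySem.Int.floordiv ((P + 1 : ℕ) : Int) 2 = (((P + 1) / 2 : ℕ) : Int) from by
          exact_mod_cast PySem.Int.floordiv_natCast (P + 1) 2] at hst'
      obtain ⟨g1, g2, g3⟩ := innerB w (P + 1) (by omega) ((P + 1) / 2) (by omega)
        stP.1 stP.2 (by omega) st' (by rw [hst'])
      have hupto : upTo w (P + 1) ((P + 1) / 2) = halvesAt w (P + 1) := rfl
      have hfilter : (upTo w (P + 1) ((P + 1) / 2)).filter
          (fun u => !(PySem.Set.contains stP.2 u)) = newAt w (P + 1) := by
        rw [hupto]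
        unfold newAt
        apply List.filter_congr
        intro u _
        rw [show (P + 1 - 1 : ℕ) = P from by omega]
        congr 1
        rcases hmm : PySem.Set.contains stP.2 u with _ | _
        · have : u ∉ flatH w P := by
            intro hmem
            have := (PySem.Set.contains_iff stP.2 u).2 ((h3 u).2 hmem)
            rw [hmm] at this
            simp at this
          simp [this]
        · have := (h3 u).1 ((PySem.Set.contains_iff stP.2 u).1 hmm)
          simp [this]
      refine ⟨by rw [g1, h1], ?_, ?_⟩
      · intro q
        rw [g2 q, hfilter]
        by_cases hq : q = P + 1
        · rw [if_pos hq, h2 (P + 1), if_neg (by omega), if_neg (by omega), hq,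
            if_neg (by omega), if_pos (by omega)]
          simp
        · rw [if_neg hq, h2 q]
          by_cases hq0 : q = 0
          · rw [if_pos hq0, if_pos hq0]
          · rw [if_neg hq0, if_neg hq0]
            by_cases hq2 : 2 ≤ q ∧ q ≤ P
            · rw [if_pos hq2, if_pos (by omega)]
            · rw [if_neg hq2, if_neg (by omega)]
      · intro u
        rw [g3 u, hupto, flatH_succ, List.mem_append, h3 u]

lemma newAt_one (w : String) : newAt w 1 = [] := rfl

lemma c0_len (w : String) :
    (PySem.List.pySetD (List.replicate (w.toList.length + 1) (0 : Int)) 0 1).length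
      = w.toList.length + 1 := by
  rw [PySem.List.length_pySetD, List.length_replicate]

lemma c0_val (w : String) (q : ℕ) :
    PySem.List.pyGetD (PySem.List.pySetD (List.replicate (w.toList.length + 1) (0 : Int)) 0 1)
      (q : Int) 0 = if q = 0 then 1 else 0 := by
  rw [PySem.List.pySetD_of_nonneg _ _ (le_refl 0),
    show (0 : Int).toNat = 0 from rfl,
    PySem.List.pyGetD_natCast, List.getD_eq_getElem?_getD]
  rcases q with _ | q
  · simp
  · simp [List.getElem?_replicate]
    split <;> rfl

set_option maxHeartbeats 1000000 in
lemma main_eq (w : String) (i : Int) :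
    positions_with_nb_squares w i = positions_with_nb_squares_alt w i := by
  simp only [positions_with_nb_squares, positions_with_nb_squares_alt, len_str]
  rw [PySem.List.foldl_append_if
    (fun pos => PySem.List.pyGetD
      (squares_distribution (squares_inventory w) ((w.toList.length : ℕ) : Int)) pos 0 == i)
    (fun pos => pos), List.nil_append, List.map_id']
  rw [show ((w.toList.length : Int) + 1).toNat = w.toList.length + 1 from by omega]
  apply List.filter_congr
  intro pos hpos
  rw [PySem.List.mem_pyRange_one] at hpos
  have hq : pos = ((pos.toNat : ℕ) : Int) := by omega
  have hqlt : pos.toNat < w.toList.length := by omega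
  obtain ⟨e1, e2, e3⟩ := outerB w w.toList.length (by omega) (le_refl _)
    (PySem.List.pySetD (List.replicate (w.toList.length + 1) (0 : Int)) 0 1)
    (c0_len w) (c0_val w) _ rfl
  rw [hq, e2 pos.toNat, distrib_eq w pos.toNat]
  rcases Nat.eq_zero_or_pos pos.toNat with h0 | h1
  · rw [h0, Nat.cast_zero, count_A_zero w, Nat.cast_one, if_pos rfl]
  · rw [if_neg (by omega)]
    rw [count_A_pos w pos.toNat h1 (by omega)]
    by_cases h2 : 2 ≤ pos.toNat
    · rw [if_pos (by omega)]
    · have : pos.toNat = 1 := by omega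
      rw [this, newAt_one, if_neg (by omega)]
      rfl

-- ===== VERDICT (by name: the statement is the Claim_ definition above) =====
theorem positions_with_nb_squares_spec : Claim_equal_positions_with_nb_squares := by
  intro word i _
  unfold Spec_positions_with_nb_squares
  exact main_eq word i
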